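-- pv_equiv track=rewrite | github.com/robert-lamprecht/Tmaze-toolkit | tmaze_toolkit/processing/concurrent_movement.py | find_concurrent_movement
-- ===== SOURCE A (Python) =====
-- def find_concurrent_movement(trace1, trace2):
--     """
--     Find periods where two traces have concurrent movement (both are 1).
--
--     Args:
--         trace1 (array-like): First binary trace (0s and 1s)
--         trace2 (array-like): Second binary trace (0s and 1s)
--
--     Returns:
--         tuple: Two lists containing the start and end indices of concurrent movement
--     """
--     if len(trace1) != len(trace2):
--         raise ValueError("Traces must be the same length")
--
--     concurrent_starts = []
--     concurrent_ends = []
--     in_concurrent = False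
--
--     for i in range(len(trace1)):
--         # Check if both traces are 1 at this point
--         is_concurrent = trace1[i] == 1 and trace2[i] == 1
--
--         # Start of concurrent movement
--         if not in_concurrent and is_concurrent:
--             concurrent_starts.append(i)
--             in_concurrent = True
--
--         # End of concurrent movement
--         elif in_concurrent and not is_concurrent:
--             concurrent_ends.append(i)
--             in_concurrent = False
--
--     # Handle case where traces end during concurrent movement
--     if in_concurrent:
--         concurrent_ends.append(len(trace1))
--
--     return concurrent_starts, concurrent_ends
-- ===== SOURCE B (Python) =====
-- def find_concurrent_movement(trace1, trace2):
--     """Edge-detection reimplementation: two comprehensions over the padded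
--     concurrency stream instead of a stateful scan."""
--     if len(trace1) != len(trace2):
--         raise ValueError("Traces must be the same length")
--     c = [a == 1 and b == 1 for a, b in zip(trace1, trace2)]
--     starts = [i for i, (cur, prev) in enumerate(zip(c, [False] + c)) if cur and not prev]
--     ends = [i for i, (prev, cur) in enumerate(zip([False] + c, c + [False])) if prev and not cur]
--     return starts, ends
-- ===== Notes on version B (the rewrite author's own statement) =====
-- stated objective: alternative
-- what changed: Replaces A's stateful in_concurrent scan by edge detection: B builds the boolean concurrency stream once and extracts run starts/ends with two independent comprehensions over the stream zipped with its padded shifts.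
import Mathlib
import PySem

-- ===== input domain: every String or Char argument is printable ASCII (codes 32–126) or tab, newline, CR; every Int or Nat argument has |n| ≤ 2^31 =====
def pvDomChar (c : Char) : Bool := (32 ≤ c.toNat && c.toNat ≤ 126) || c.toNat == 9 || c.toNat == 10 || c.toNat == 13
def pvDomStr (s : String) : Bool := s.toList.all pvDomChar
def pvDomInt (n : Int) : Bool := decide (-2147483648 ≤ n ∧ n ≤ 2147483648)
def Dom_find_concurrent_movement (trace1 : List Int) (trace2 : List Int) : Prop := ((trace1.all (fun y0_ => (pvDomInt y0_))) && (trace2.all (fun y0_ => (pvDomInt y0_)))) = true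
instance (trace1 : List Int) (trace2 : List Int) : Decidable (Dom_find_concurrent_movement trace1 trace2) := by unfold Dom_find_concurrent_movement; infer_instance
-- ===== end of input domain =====

-- B replaces A's stateful scan by edge detection: two comprehensions over the
-- padded concurrency stream (objective: alternative decomposition, same cost).

-- ===== PORT A =====
def find_concurrent_movement (trace1 : List Int) (trace2 : List Int) : List Int × List Int :=
  -- `if len(trace1) != len(trace2): raise ValueError` — excluded by Pre_
  let st := (PySem.List.pyRange 0 (trace1.length : Int) 1).foldl
    (fun (st : List Int × List Int × Bool) i =>
      -- i is always in range here, so the pyGetD default is never read (exact)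
      let isC := (PySem.List.pyGetD trace1 i 0 == 1) && (PySem.List.pyGetD trace2 i 0 == 1)
      if !st.2.2 && isC then (st.1 ++ [i], st.2.1, true)
      else if st.2.2 && !isC then (st.1, st.2.1 ++ [i], false)
      else st) ([], [], false)
  if st.2.2 then (st.1, st.2.1 ++ [(trace1.length : Int)]) else (st.1, st.2.1)

-- ===== PORT B =====
def find_concurrent_movement_alt (trace1 : List Int) (trace2 : List Int) : List Int × List Int :=
  -- `if len(trace1) != len(trace2): raise ValueError` — excluded by Pre_
  let c := (trace1.zip trace2).map (fun p => p.1 == 1 && p.2 == 1)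
  let starts := ((PySem.List.enumerate (c.zip (false :: c))).filter
      (fun x => x.2.1 && !x.2.2)).map (fun x => x.1)
  let ends := ((PySem.List.enumerate ((false :: c).zip (c ++ [false]))).filter
      (fun x => x.2.1 && !x.2.2)).map (fun x => x.1)
  (starts, ends)

-- ===== PRECONDITION & SPEC =====
-- A raises ValueError when the traces differ in length; Pre_ admits exactly the inputs A returns on.
def Pre_find_concurrent_movement (trace1 : List Int) (trace2 : List Int) : Prop :=
  trace1.length = trace2.length
instance (trace1 : List Int) (trace2 : List Int) : Decidable (Pre_find_concurrent_movement trace1 trace2) := by unfold Pre_find_concurrent_movement; infer_instance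
def pvWitness_find_concurrent_movement : List Int × List Int := ([1, 0, 1], [1, 1, 1])

def Spec_find_concurrent_movement (trace1 : List Int) (trace2 : List Int) (out : List Int × List Int) : Prop := out = find_concurrent_movement_alt trace1 trace2
instance (trace1 : List Int) (trace2 : List Int) (out : List Int × List Int) : Decidable (Spec_find_concurrent_movement trace1 trace2 out) := by unfold Spec_find_concurrent_movement; infer_instance

-- ===== CLAIM (what is proved, stated in full; the proofs are below) =====
def Claim_equal_find_concurrent_movement : Prop := ∀ (trace1 : List Int) (trace2 : List Int), Dom_find_concurrent_movement trace1 trace2 → Pre_find_concurrent_movement trace1 trace2 → Spec_find_concurrent_movement trace1 trace2 (find_concurrent_movement trace1 trace2)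

-- ===== LEMMAS AND PROOFS =====

-- Reference recursion: runs of `true` in the stream c, indices starting at i,
-- previous value prev; returns (start indices, end indices incl. final close).
def pvRuns (c : List Bool) (i : Int) (prev : Bool) : List Int × List Int :=
  match c with
  | [] => ([], if prev then [i] else [])
  | b :: rest =>
    let r := pvRuns rest (i + 1) b
    (if b && !prev then i :: r.1 else r.1, if prev && !b then i :: r.2 else r.2)

-- A's loop over the stream with absolute index
def pvLoopC (c : List Bool) (i : Int) (st : List Int × List Int × Bool) : List Int × List Int × Bool :=
  match c with
  | [] => st
  | b :: rest => pvLoopC rest (i + 1)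
      (if !st.2.2 && b then (st.1 ++ [i], st.2.1, true)
       else if st.2.2 && !b then (st.1, st.2.1 ++ [i], false)
       else st)

lemma pvLoopC_runs : ∀ (c : List Bool) (i : Int) (s e : List Int) (inC : Bool),
    (let st := pvLoopC c i (s, e, inC);
     if st.2.2 then (st.1, st.2.1 ++ [i + c.length]) else (st.1, st.2.1))
      = (s ++ (pvRuns c i inC).1, e ++ (pvRuns c i inC).2) := by
  intro c
  induction c with
  | nil => intro i s e inC; cases inC <;> simp [pvLoopC, pvRuns]
  | cons b rest ih =>
    intro i s e inC
    have hlen : i + ((b :: rest).length : Int) = (i + 1) + rest.length := by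
      simp; omega
    cases inC <;> cases b <;>
      simp only [pvLoopC, pvRuns, Bool.not_true, Bool.not_false, Bool.and_true,
        Bool.and_false, if_true, hlen] <;>
      rw [ih] <;> simp [List.append_assoc]

-- index loop over two lists = loop over the zipped stream
lemma pvFold_stream : ∀ (u1 u2 t1 t2 : List Int) (k : Nat) (st : List Int × List Int × Bool),
    u1.length = u2.length → t1.drop k = u1 → t2.drop k = u2 →
    (PySem.List.pyRange (k : Int) ((k : Int) + u1.length) 1).foldl
      (fun (st : List Int × List Int × Bool) i =>
        let isC := (PySem.List.pyGetD t1 i 0 == 1) && (PySem.List.pyGetD t2 i 0 == 1)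
        if !st.2.2 && isC then (st.1 ++ [i], st.2.1, true)
        else if st.2.2 && !isC then (st.1, st.2.1 ++ [i], false)
        else st) st
    = pvLoopC ((u1.zip u2).map (fun p => p.1 == 1 && p.2 == 1)) (k : Int) st := by
  intro u1
  induction u1 with
  | nil =>
    intro u2 t1 t2 k st hlen h1 h2
    have : u2 = [] := by simpa using (List.length_eq_zero_iff.mp hlen.symm)
    subst this
    simp [PySem.List.pyRange_one_eq_nil, pvLoopC]
  | cons a u1' ih =>
    intro u2 t1 t2 k st hlen h1 h2
    obtain ⟨b, u2', rfl⟩ : ∃ b u2', u2 = b :: u2' := by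
      cases u2 with
      | nil => simp at hlen
      | cons x xs => exact ⟨x, xs, rfl⟩
    have hcons : PySem.List.pyRange (k : Int) ((k : Int) + (a :: u1').length) 1
        = (k : Int) :: PySem.List.pyRange ((k : Int) + 1) ((k : Int) + (a :: u1').length) 1 :=
      PySem.List.pyRange_one_cons (by simp)
    have hg1 : PySem.List.pyGetD t1 (k : Int) 0 = a := by
      rw [PySem.List.pyGetD_natCast]
      have : t1[k]? = some a := by
        rw [← Nat.add_zero k, ← List.getElem?_drop, h1]; rfl
      simp [List.getD, this]
    have hg2 : PySem.List.pyGetD t2 (k : Int) 0 = b := by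
      rw [PySem.List.pyGetD_natCast]
      have : t2[k]? = some b := by
        rw [← Nat.add_zero k, ← List.getElem?_drop, h2]; rfl
      simp [List.getD, this]
    have hd1 : t1.drop (k + 1) = u1' := by
      have h := congrArg List.tail h1
      simpa [List.tail_drop] using h
    have hd2 : t2.drop (k + 1) = u2' := by
      have h := congrArg List.tail h2
      simpa [List.tail_drop] using h
    have hlen' : u1'.length = u2'.length := by simpa using hlen
    have hkk : ((k : Int) + 1) = ((k + 1 : Nat) : Int) := by omega
    have hub : (k : Int) + ((a :: u1').length : Int) = ((k + 1 : Nat) : Int) + (u1'.length : Int) := by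
      simp; omega
    rw [hcons]
    simp only [List.foldl_cons, hg1, hg2, hub, hkk]
    rw [ih u2' t1 t2 (k + 1) _ hlen' hd1 hd2]
    simp only [List.zip_cons_cons, List.map_cons, pvLoopC, ← hkk]

-- B's starts comprehension computes pvRuns's first component
lemma pvStarts_runs : ∀ (c : List Bool) (prev : Bool) (i : Int),
    ((PySem.List.enumerate (c.zip (prev :: c)) i).filter
        (fun x => x.2.1 && !x.2.2)).map (fun x => x.1) = (pvRuns c i prev).1 := by
  intro c
  induction c with
  | nil => intro prev i; simp [pvRuns]
  | cons b rest ih =>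
    intro prev i
    cases prev <;> cases b <;>
      simp [PySem.List.enumerate_cons, pvRuns, ih]

-- B's ends comprehension computes pvRuns's second component
lemma pvEnds_runs : ∀ (c : List Bool) (prev : Bool) (i : Int),
    ((PySem.List.enumerate ((prev :: c).zip (c ++ [false])) i).filter
        (fun x => x.2.1 && !x.2.2)).map (fun x => x.1) = (pvRuns c i prev).2 := by
  intro c
  induction c with
  | nil => intro prev i; cases prev <;> simp [PySem.List.enumerate, pvRuns]
  | cons b rest ih =>
    intro prev i
    cases prev <;> cases b <;>
      simp [PySem.List.enumerate_cons, pvRuns, ih]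

-- ===== VERDICT (by name: the statement is the Claim_ definition above) =====
theorem find_concurrent_movement_spec : Claim_equal_find_concurrent_movement := by
  intro t1 t2 _ hpre
  unfold Spec_find_concurrent_movement
  unfold Pre_find_concurrent_movement at hpre
  set c := (t1.zip t2).map (fun p => p.1 == 1 && p.2 == 1) with hc
  have hclen : (c.length : Int) = (t1.length : Int) := by
    simp [hc, List.length_zip, hpre]
  have hfold := pvFold_stream t1 t2 t1 t2 0 ([], [], false) hpre (by simp) (by simp)
  have hloop := pvLoopC_runs c 0 [] [] false
  simp only [Nat.cast_zero, zero_add, ← hc, hclen] at hfold hloop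
  unfold find_concurrent_movement find_concurrent_movement_alt
  simp only [← hc, hfold]
  simp only [List.nil_append] at hloop
  rw [hloop]
  rw [← pvStarts_runs c false 0, ← pvEnds_runs c false 0]
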